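-- pv_equiv track=rewrite | github.com/anant1222/rag-mcp-playground | app/utils/prompts.py | enhance_query_for_entity_resolution
-- ===== SOURCE A (Python) =====
-- def enhance_query_for_entity_resolution(query: str) -> str:
--     """
--     Enhance query to help with entity resolution
--
--     Args:
--         query: Original user query
--
--     Returns:
--         Enhanced query with entity hints
--     """
--     # Common name variations - can be expanded
--     entity_mappings = {
--         "anant": "Anant Kumar Yadav",
--         "anant's": "Anant Kumar Yadav's",
--         "anant has": "Anant Kumar Yadav has",
--         "anant is": "Anant Kumar Yadav is",
--         "who is anant": "who is Anant Kumar Yadav",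
--         "what is anant": "what is Anant Kumar Yadav",
--     }
--
--     query_lower = query.lower()
--
--     # Check if query contains entity references
--     for key, value in entity_mappings.items():
--         if key in query_lower:
--             # Add both the original and full name to help retrieval
--             enhanced = f"{query} (also search for: {value})"
--             return enhanced
--
--     return query
-- ===== SOURCE B (Python) =====
-- def enhance_query_for_entity_resolution(query: str) -> str:
--     # Every alias key in A's table contains "anant", so A's first-match loop
--     # fires exactly when "anant" occurs in the lowered query, always on the
--     # first key. Collapse the table and loop into a single guard.
--     if "anant" in query.lower():
--         return f"{query} (also search for: Anant Kumar Yadav)"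
--     return query
-- ===== Notes on version B (the rewrite author's own statement) =====
-- stated objective: simpler
-- what changed: Replaced the alias table and first-match loop with a single substring guard: every key of A's mapping contains "anant", so the loop fires iff the lowered query contains "anant", always on the first entry with value "Anant Kumar Yadav".
import Mathlib
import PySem

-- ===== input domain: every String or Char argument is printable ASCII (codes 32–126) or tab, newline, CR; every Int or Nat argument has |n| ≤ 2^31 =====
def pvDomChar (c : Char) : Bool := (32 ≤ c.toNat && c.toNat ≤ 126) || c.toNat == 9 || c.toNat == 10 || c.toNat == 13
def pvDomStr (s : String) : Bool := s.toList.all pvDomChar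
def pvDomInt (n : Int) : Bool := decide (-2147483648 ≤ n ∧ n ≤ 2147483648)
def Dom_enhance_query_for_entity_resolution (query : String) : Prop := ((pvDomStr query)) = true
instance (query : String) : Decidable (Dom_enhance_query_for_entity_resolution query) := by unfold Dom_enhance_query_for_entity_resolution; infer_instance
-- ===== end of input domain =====

-- B collapses A's alias table and first-match loop into one substring guard; every table key contains "anant", so behaviour is identical.

-- ===== PORT A =====
-- the loop 'for key, value in entity_mappings.items(): if key in query_lower: return …'
def pvLoopA : List (String × String) → String → String → String
  | [], query, _ => query
  | (k, v) :: rest, query, ql =>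
      if PySem.Str.isIn k ql then query ++ " (also search for: " ++ v ++ ")"
      else pvLoopA rest query ql

def enhance_query_for_entity_resolution (query : String) : String :=
  let entity_mappings : List (String × String) :=
    [("anant", "Anant Kumar Yadav"),
     ("anant's", "Anant Kumar Yadav's"),
     ("anant has", "Anant Kumar Yadav has"),
     ("anant is", "Anant Kumar Yadav is"),
     ("who is anant", "who is Anant Kumar Yadav"),
     ("what is anant", "what is Anant Kumar Yadav")]
  let query_lower := PySem.Str.lower query
  pvLoopA entity_mappings query query_lower

-- ===== PORT B =====
def enhance_query_for_entity_resolution_alt (query : String) : String :=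
  if PySem.Str.isIn "anant" (PySem.Str.lower query) then
    query ++ " (also search for: Anant Kumar Yadav)"
  else query

-- ===== PRECONDITION & SPEC =====
def Spec_enhance_query_for_entity_resolution (query : String) (out : String) : Prop := out = enhance_query_for_entity_resolution_alt query
instance (query : String) (out : String) : Decidable (Spec_enhance_query_for_entity_resolution query out) := by unfold Spec_enhance_query_for_entity_resolution; infer_instance

-- ===== CLAIM (what is proved, stated in full; the proofs are below) =====
def Claim_equal_enhance_query_for_entity_resolution : Prop := ∀ (query : String), Dom_enhance_query_for_entity_resolution query → Spec_enhance_query_for_entity_resolution query (enhance_query_for_entity_resolution query)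

-- ===== LEMMAS AND PROOFS =====

-- if "anant" is not in ql, no key containing "anant" is in ql
lemma pv_not_in_of_anant_not (ql k : List Char)
    (h : PySem.Chars.isIn ['a','n','a','n','t'] ql = false)
    (hk : ['a','n','a','n','t'] <:+: k) :
    PySem.Chars.isIn k ql = false := by
  by_contra hne
  have ht : k <:+: ql := (PySem.Chars.isIn_iff_infix k ql).mp (by
    cases hkin : PySem.Chars.isIn k ql with
    | true => rfl
    | false => exact absurd hkin hne)
  have : PySem.Chars.isIn ['a','n','a','n','t'] ql = true :=
    (PySem.Chars.isIn_iff_infix _ _).mpr (hk.trans ht)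
  simp [this] at h

-- ===== VERDICT (by name: the statement is the Claim_ definition above) =====
theorem enhance_query_for_entity_resolution_spec : Claim_equal_enhance_query_for_entity_resolution := by
  intro query _
  unfold Spec_enhance_query_for_entity_resolution
  unfold enhance_query_for_entity_resolution enhance_query_for_entity_resolution_alt
  set ql := PySem.Str.lower query with hql
  cases h : PySem.Chars.isIn ['a','n','a','n','t'] ql.toList with
  | true =>
    simp [pvLoopA, PySem.Str.isIn, h, String.append_assoc]
  | false =>
    have h2 := pv_not_in_of_anant_not ql.toList ['a','n','a','n','t','\'','s'] h (by decide)
    have h3 := pv_not_in_of_anant_not ql.toList ['a','n','a','n','t',' ','h','a','s'] h (by decide)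
    have h4 := pv_not_in_of_anant_not ql.toList ['a','n','a','n','t',' ','i','s'] h (by decide)
    have h5 := pv_not_in_of_anant_not ql.toList ['w','h','o',' ','i','s',' ','a','n','a','n','t'] h (by decide)
    have h6 := pv_not_in_of_anant_not ql.toList ['w','h','a','t',' ','i','s',' ','a','n','a','n','t'] h (by decide)
    simp [pvLoopA, PySem.Str.isIn, h, h2, h3, h4, h5, h6]
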